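-- pv_equiv track=rewrite | github.com/avalonreset/wan2gp-operator-skill | scripts/_wan2gp_common.py | strip_flag_with_value
-- ===== SOURCE A (Python) =====
-- def strip_flag_with_value(command: list[str], flag: str) -> list[str]:
--     """Return a command with a '--flag value' pair removed if present."""
--     if flag not in command:
--         return command[:]
--     cleaned: list[str] = []
--     skip_next = False
--     for idx, token in enumerate(command):
--         if skip_next:
--             skip_next = False
--             continue
--         if token == flag:
--             has_value = idx + 1 < len(command) and not command[idx + 1].startswith("--")
--             skip_next = has_value
--             continue
--         cleaned.append(token)
--     return cleaned
-- ===== SOURCE B (Python) =====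
-- def strip_flag_with_value(command: list[str], flag: str) -> list[str]:
--     """Return a command with a '--flag value' pair removed if present."""
--     drop: set[int] = set()
--     for i, tok in enumerate(command):
--         if tok == flag and i not in drop:
--             drop.add(i)
--             if i + 1 < len(command) and not command[i + 1].startswith("--"):
--                 drop.add(i + 1)
--     return [tok for i, tok in enumerate(command) if i not in drop]
-- ===== Notes on version B (the rewrite author's own statement) =====
-- stated objective: alternative
-- what changed: Replaces A's single stateful scan (membership pre-check plus skip_next flag while appending) by a two-phase index-set approach: first mark the set of indices to drop, then rebuild the list by filtering enumerate against that set.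
import Mathlib
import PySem

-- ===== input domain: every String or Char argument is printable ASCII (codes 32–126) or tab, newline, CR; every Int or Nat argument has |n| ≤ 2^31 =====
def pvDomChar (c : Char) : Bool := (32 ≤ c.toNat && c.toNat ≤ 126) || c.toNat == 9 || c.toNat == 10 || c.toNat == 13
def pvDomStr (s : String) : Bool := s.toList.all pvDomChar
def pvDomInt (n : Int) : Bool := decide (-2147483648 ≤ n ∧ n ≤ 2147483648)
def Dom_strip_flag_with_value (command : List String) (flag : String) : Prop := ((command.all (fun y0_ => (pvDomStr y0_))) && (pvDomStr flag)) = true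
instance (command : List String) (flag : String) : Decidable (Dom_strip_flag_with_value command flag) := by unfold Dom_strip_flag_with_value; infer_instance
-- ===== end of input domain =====

-- B replaces A's single stateful scan with a mark-indices-then-filter two-phase pass (alternative decomposition, same cost).

-- ===== PORT A =====
-- literal port of A: guard 'flag not in command', then one pass over enumerate with (cleaned, skip_next) state
def strip_flag_with_value (command : List String) (flag : String) : List String :=
  if ¬ (flag ∈ command) then command
  else
    ((PySem.List.enumerate command).foldl
      (fun (st : List String × Bool) (p : Int × String) =>
        if st.2 then (st.1, false)
        else if p.2 == flag then
          (st.1, decide (p.1 + 1 < (command.length : Int)) &&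
                 !(PySem.Str.startswith (PySem.List.pyGetD command (p.1 + 1) "") "--"))
        else (st.1 ++ [p.2], st.2))
      ([], false)).1

-- ===== PORT B =====
-- port of Source B: first build the set of indices to drop, then filter enumerate against it
def strip_flag_with_value_alt (command : List String) (flag : String) : List String :=
  let drop : PySem.Set Int :=
    (PySem.List.enumerate command).foldl
      (fun (d : PySem.Set Int) (p : Int × String) =>
        if p.2 == flag && !(PySem.Set.contains d p.1) then
          let d1 := PySem.Set.add d p.1
          if decide (p.1 + 1 < (command.length : Int)) &&
             !(PySem.Str.startswith (PySem.List.pyGetD command (p.1 + 1) "") "--")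
          then PySem.Set.add d1 (p.1 + 1) else d1
        else d)
      PySem.Set.empty
  (PySem.List.enumerate command).filterMap
    (fun p => if PySem.Set.contains drop p.1 then none else some p.2)

-- ===== PRECONDITION & SPEC =====
def Spec_strip_flag_with_value (command : List String) (flag : String) (out : List String) : Prop := out = strip_flag_with_value_alt command flag
instance (command : List String) (flag : String) (out : List String) : Decidable (Spec_strip_flag_with_value command flag out) := by unfold Spec_strip_flag_with_value; infer_instance

-- ===== CLAIM (what is proved, stated in full; the proofs are below) =====
def Claim_equal_strip_flag_with_value : Prop := ∀ (command : List String) (flag : String), Dom_strip_flag_with_value command flag → Spec_strip_flag_with_value command flag (strip_flag_with_value command flag)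

-- ===== LEMMAS AND PROOFS =====

-- common specification: one recursive pass with a skip flag
def specF (flag : String) : List String → Bool → List String
  | [], _ => []
  | _ :: rest, true => specF flag rest false
  | t :: rest, false =>
    if t = flag then
      specF flag rest (match rest with
        | [] => false
        | v :: _ => !(PySem.Chars.startswith v.toList ['-', '-']))
    else t :: specF flag rest false

-- indices dropped from position k on, skip = "index k already marked dropped"
def dropF (flag : String) : List String → Int → Bool → List Int
  | [], k, skip => if skip then [k] else []
  | _ :: rest, k, true => k :: dropF flag rest (k + 1) false
  | t :: rest, k, false =>
    if t = flag then
      match rest with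
      | [] => [k]
      | v :: _ =>
          if PySem.Chars.startswith v.toList ['-', '-'] then k :: dropF flag rest (k + 1) false
          else k :: dropF flag rest (k + 1) true
    else dropF flag rest (k + 1) false

-- indices newly appended by B's marking fold from position k on
def newF (flag : String) : List String → Int → Bool → List Int
  | [], _, _ => []
  | _ :: rest, k, true => newF flag rest (k + 1) false
  | t :: rest, k, false =>
    if t = flag then
      match rest with
      | [] => [k]
      | v :: _ =>
          if PySem.Chars.startswith v.toList ['-', '-'] then k :: newF flag rest (k + 1) false
          else k :: (k + 1) :: newF flag rest (k + 1) true
    else newF flag rest (k + 1) false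

theorem contT {D : List Int} {x : Int} (h : x ∈ D) : PySem.Set.contains D x = true := by
  simpa using h

theorem contF {D : List Int} {x : Int} (h : x ∉ D) : PySem.Set.contains D x = false := by
  simpa using h

theorem dropF_eq_newF (flag : String) :
    ∀ (rest : List String) (k : Int) (skip : Bool),
      dropF flag rest k skip = (if skip then [k] else []) ++ newF flag rest k skip := by
  intro rest
  induction rest with
  | nil => intro k skip; cases skip <;> simp [dropF, newF]
  | cons t rest ih =>
    intro k skip
    cases skip with
    | true => simp [dropF, newF, ih (k + 1) false]
    | false =>
      by_cases ht : t = flag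
      · cases rest with
        | nil => simp [dropF, newF, ht]
        | cons v rest' =>
          by_cases hs : PySem.Chars.startswith v.toList ['-', '-'] = true
          · simpa [dropF, newF, ht, hs] using ih (k + 1) false
          · simpa [dropF, newF, ht, hs] using ih (k + 1) true
      · simp [dropF, newF, ht, ih (k + 1) false]

theorem dropF_lb (flag : String) :
    ∀ (rest : List String) (k : Int) (skip : Bool) (j : Int),
      j ∈ dropF flag rest k skip → k ≤ j := by
  intro rest
  induction rest with
  | nil =>
    intro k skip j hj
    cases skip <;> simp [dropF] at hj
    omega
  | cons t rest ih =>
    intro k skip j hj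
    cases skip with
    | true =>
      have hstep : dropF flag (t :: rest) k true = k :: dropF flag rest (k + 1) false := by
        simp [dropF]
      rw [hstep, List.mem_cons] at hj
      rcases hj with rfl | hj
      · omega
      · have := ih (k + 1) false j hj; omega
    | false =>
      by_cases ht : t = flag
      · cases rest with
        | nil =>
          have hstep : dropF flag [t] k false = [k] := by simp [dropF, ht]
          rw [hstep, List.mem_singleton] at hj
          omega
        | cons v rest' =>
          by_cases hs : PySem.Chars.startswith v.toList ['-', '-'] = true
          · have hstep : dropF flag (t :: v :: rest') k false =
                k :: dropF flag (v :: rest') (k + 1) false := by simp [dropF, ht, hs]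
            rw [hstep, List.mem_cons] at hj
            rcases hj with rfl | hj
            · omega
            · have := ih (k + 1) false j hj; omega
          · have hstep : dropF flag (t :: v :: rest') k false =
                k :: dropF flag (v :: rest') (k + 1) true := by simp [dropF, ht, hs]
            rw [hstep, List.mem_cons] at hj
            rcases hj with rfl | hj
            · omega
            · have := ih (k + 1) true j hj; omega
      · have hstep : dropF flag (t :: rest) k false = dropF flag rest (k + 1) false := by
          simp [dropF, ht]
        rw [hstep] at hj
        have := ih (k + 1) false j hj; omega

-- the has_value boolean both ports compute, when the tail is empty / nonempty
theorem hv_nil (command : List String) (n : Nat) (t : String)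
    (h : command.drop n = [t]) :
    (decide ((n : Int) + 1 < (command.length : Int)) &&
      !(PySem.Str.startswith (PySem.List.pyGetD command ((n : Int) + 1) "") "--")) = false := by
  have hdrop : command.drop (n + 1) = [] := by
    have := congrArg List.tail h
    simpa [List.tail_drop] using this
  have hlen : command.length ≤ n + 1 := by
    have := congrArg List.length hdrop
    simp at this; omega
  have : ¬ ((n : Int) + 1 < (command.length : Int)) := by exact_mod_cast by omega
  simp [this]

theorem hv_cons (command : List String) (n : Nat) (t v : String) (rest'' : List String)
    (h : command.drop n = t :: v :: rest'') :
    (decide ((n : Int) + 1 < (command.length : Int)) &&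
      !(PySem.Str.startswith (PySem.List.pyGetD command ((n : Int) + 1) "") "--"))
    = !(PySem.Chars.startswith v.toList ['-', '-']) := by
  have hdrop : command.drop (n + 1) = v :: rest'' := by
    have := congrArg List.tail h
    simpa [List.tail_drop] using this
  have hlt : n + 1 < command.length := by
    have := congrArg List.length hdrop
    simp at this; omega
  have hget : command.getD (n + 1) "" = v := by
    have h0 : command[n + 1]? = some v := by
      have : (command.drop (n + 1))[0]? = some v := by simp [hdrop]
      simpa [List.getElem?_drop] using this
    simp [List.getD, h0]
  have hcast : ((n : Int) + 1) = ((n + 1 : Nat) : Int) := by push_cast; ring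
  rw [hcast, PySem.List.pyGetD_natCast, hget]
  have hdec : decide (((n + 1 : Nat) : Int) < (command.length : Int)) = true :=
    decide_eq_true (by exact_mod_cast hlt)
  rw [hdec, Bool.true_and]
  simp

-- A's fold computes specF
theorem lemA (command : List String) (flag : String) :
    ∀ (rest : List String) (n : Nat), command.drop n = rest →
      ∀ (acc : List String) (skip : Bool),
        ((PySem.List.enumerate rest (n : Int)).foldl
          (fun (st : List String × Bool) (p : Int × String) =>
            if st.2 then (st.1, false)
            else if p.2 == flag then
              (st.1, decide (p.1 + 1 < (command.length : Int)) &&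
                     !(PySem.Str.startswith (PySem.List.pyGetD command (p.1 + 1) "") "--"))
            else (st.1 ++ [p.2], st.2))
          (acc, skip)).1 = acc ++ specF flag rest skip := by
  intro rest
  induction rest with
  | nil => intro n _ acc skip; simp [PySem.List.enumerate_nil, specF]
  | cons t rest ih =>
    intro n h acc skip
    have hdrop : command.drop (n + 1) = rest := by
      have := congrArg List.tail h
      simpa [List.tail_drop] using this
    have hcast : (n : Int) + 1 = ((n + 1 : Nat) : Int) := by push_cast; ring
    rw [PySem.List.enumerate_cons]
    cases skip with
    | true =>
      simp only [List.foldl_cons]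
      rw [hcast]
      simpa [specF] using ih (n + 1) hdrop acc false
    | false =>
      by_cases ht : t = flag
      · have hbeq : (t == flag) = true := by simp [ht]
        simp only [List.foldl_cons, Bool.false_eq_true, if_false, hbeq, if_true]
        cases rest with
        | nil =>
          rw [hv_nil command n t h, hcast, ih (n + 1) hdrop acc false]
          simp [specF, ht]
        | cons v rest'' =>
          rw [hv_cons command n t v rest'' h, hcast,
            ih (n + 1) hdrop acc (!(PySem.Chars.startswith v.toList ['-', '-']))]
          simp [specF, ht]
      · have hbeq : (t == flag) = false := by simp [ht]
        simp only [List.foldl_cons, Bool.false_eq_true, if_false, hbeq]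
        rw [hcast, ih (n + 1) hdrop (acc ++ [t]) false]
        simp [specF, ht]

-- when the flag is absent, specF is the identity
theorem specF_id (flag : String) :
    ∀ (rest : List String), flag ∉ rest → specF flag rest false = rest := by
  intro rest
  induction rest with
  | nil => intro _; simp [specF]
  | cons t rest ih =>
    intro h
    have ht : t ≠ flag := fun e => h (by simp [e])
    have : flag ∉ rest := fun e => h (by simp [e])
    simp [specF, ht, ih this]

theorem A_eq_specF (command : List String) (flag : String) :
    strip_flag_with_value command flag = specF flag command false := by
  unfold strip_flag_with_value
  by_cases hmem : flag ∈ command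
  · simp only [hmem, not_true, if_false]
    simpa using lemA command flag command 0 (by simp) [] false
  · simp [hmem, specF_id flag command hmem]

-- B's marking fold appends exactly newF
theorem lemBfold (command : List String) (flag : String) :
    ∀ (rest : List String) (n : Nat), command.drop n = rest →
      ∀ (d : List Int), (∀ j ∈ d, j ≤ (n : Int)) →
        ((PySem.List.enumerate rest (n : Int)).foldl
          (fun (d : PySem.Set Int) (p : Int × String) =>
            if p.2 == flag && !(PySem.Set.contains d p.1) then
              let d1 := PySem.Set.add d p.1
              if decide (p.1 + 1 < (command.length : Int)) &&
                 !(PySem.Str.startswith (PySem.List.pyGetD command (p.1 + 1) "") "--")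
              then PySem.Set.add d1 (p.1 + 1) else d1
            else d)
          d) = d ++ newF flag rest (n : Int) (PySem.Set.contains d (n : Int)) := by
  intro rest
  induction rest with
  | nil =>
    intro n _ d _
    cases h : PySem.Set.contains d (n : Int) <;> simp [PySem.List.enumerate_nil, newF]
  | cons t rest ih =>
    intro n h d hd
    have hdrop : command.drop (n + 1) = rest := by
      have := congrArg List.tail h
      simpa [List.tail_drop] using this
    have hnot1 : PySem.Set.contains d ((n + 1 : Nat) : Int) = false :=
      contF (fun hmem => by have := hd _ hmem; push_cast at this; omega)
    rw [PySem.List.enumerate_cons]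
    cases hk : PySem.Set.contains d (n : Int) with
    | true =>
      have hcond : (t == flag && !(PySem.Set.contains d (n : Int))) = false := by
        rw [hk]; simp
      simp only [List.foldl_cons, hcond, Bool.false_eq_true, if_false]
      refine (ih (n + 1) hdrop d (fun j hj => by have := hd j hj; push_cast; omega)).trans ?_
      rw [hnot1]
      push_cast
      simp [newF]
    | false =>
      have hmemn : (n : Int) ∉ d := by simpa using hk
      by_cases ht : t = flag
      · have hcond : (t == flag && !(PySem.Set.contains d (n : Int))) = true := by
          rw [hk]; simp [ht]
        simp only [List.foldl_cons, hcond, if_true]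
        have hadd : PySem.Set.add d (n : Int) = d ++ [(n : Int)] := by
          simp [PySem.Set.add, hmemn]
        cases rest with
        | nil =>
          rw [hv_nil command n t h]
          simp only [Bool.false_eq_true, if_false]
          rw [hadd]
          simp [PySem.List.enumerate_nil, newF, ht]
        | cons v rest'' =>
          rw [hv_cons command n t v rest'' h]
          by_cases hs : PySem.Chars.startswith v.toList ['-', '-'] = true
          · simp only [hs, Bool.not_true, Bool.false_eq_true, if_false]
            rw [hadd]
            have hd1 : ∀ j ∈ d ++ [(n : Int)], j ≤ ((n + 1 : Nat) : Int) := by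
              intro j hj
              rcases List.mem_append.mp hj with h1 | h1
              · have := hd _ h1; push_cast; omega
              · have h2 := List.mem_singleton.mp h1; push_cast; omega
            have hc1 : PySem.Set.contains (d ++ [(n : Int)]) ((n + 1 : Nat) : Int) = false := by
              apply contF
              intro hmem
              rcases List.mem_append.mp hmem with h1 | h1
              · have := hd _ h1; push_cast at this; omega
              · have h2 := List.mem_singleton.mp h1; push_cast at h2; omega
            refine (ih (n + 1) hdrop (d ++ [(n : Int)]) hd1).trans ?_
            rw [hc1]
            push_cast
            simp [newF, ht, hs]
          · have hs' : PySem.Chars.startswith v.toList ['-', '-'] = false := by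
              simpa using hs
            simp only [hs', Bool.not_false, if_true]
            rw [hadd]
            have hm2 : ((n : Int) + 1) ∉ d ++ [(n : Int)] := by
              intro hmem
              rcases List.mem_append.mp hmem with h1 | h1
              · have := hd _ h1; omega
              · have h2 := List.mem_singleton.mp h1; omega
            have hadd2 : PySem.Set.add (d ++ [(n : Int)]) ((n : Int) + 1) =
                d ++ [(n : Int)] ++ [(n : Int) + 1] := by
              simp [PySem.Set.add, hm2]
            rw [hadd2]
            have hd2 : ∀ j ∈ d ++ [(n : Int)] ++ [((n : Int) + 1)], j ≤ ((n + 1 : Nat) : Int) := by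
              intro j hj
              rcases List.mem_append.mp hj with h1 | h1
              · rcases List.mem_append.mp h1 with h2 | h2
                · have := hd _ h2; push_cast; omega
                · have h3 := List.mem_singleton.mp h2; push_cast; omega
              · have h3 := List.mem_singleton.mp h1; push_cast; omega
            have hc2 : PySem.Set.contains (d ++ [(n : Int)] ++ [((n : Int) + 1)]) ((n + 1 : Nat) : Int) = true := by
              apply contT
              have he : ((n + 1 : Nat) : Int) = (n : Int) + 1 := by push_cast; ring
              rw [he]
              exact List.mem_append.mpr (Or.inr (List.mem_singleton.mpr rfl))
            refine (ih (n + 1) hdrop (d ++ [(n : Int)] ++ [((n : Int) + 1)]) hd2).trans ?_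
            rw [hc2]
            push_cast
            simp [newF, ht, hs']
      · have hcond : (t == flag && !(PySem.Set.contains d (n : Int))) = false := by
          rw [hk]; simp [ht]
        simp only [List.foldl_cons, hcond, Bool.false_eq_true, if_false]
        refine (ih (n + 1) hdrop d (fun j hj => by have := hd j hj; push_cast; omega)).trans ?_
        rw [hnot1]
        push_cast
        simp [newF, ht]

-- the filter phase against any list agreeing with dropF computes specF
theorem lemFilt (flag : String) :
    ∀ (rest : List String) (k : Int) (skip : Bool) (D : List Int),
      (∀ i : Int, k ≤ i → (i ∈ D ↔ i ∈ dropF flag rest k skip)) →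
      (PySem.List.enumerate rest k).filterMap
        (fun p => if PySem.Set.contains D p.1 then none else some p.2)
      = specF flag rest skip := by
  intro rest
  induction rest with
  | nil => intro k skip D _; simp [PySem.List.enumerate_nil, specF]
  | cons t rest ih =>
    intro k skip D hD
    rw [PySem.List.enumerate_cons]
    cases skip with
    | true =>
      have hkD : k ∈ D := (hD k le_rfl).mpr (by simp [dropF])
      simp only [List.filterMap_cons, contT hkD, if_true]
      rw [ih (k + 1) false D (fun i hi => by
        rw [hD i (by omega)]
        simp only [dropF, List.mem_cons]
        constructor
        · rintro (rfl | h)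
          · omega
          · exact h
        · intro h'; right; exact h')]
      simp [specF]
    | false =>
      by_cases ht : t = flag
      · cases rest with
        | nil =>
          have hkD : k ∈ D := (hD k le_rfl).mpr (by simp [dropF, ht])
          simp only [List.filterMap_cons, contT hkD, if_true]
          simp [PySem.List.enumerate_nil, specF, ht]
        | cons v rest' =>
          by_cases hs : PySem.Chars.startswith v.toList ['-', '-'] = true
          · have hkD : k ∈ D := (hD k le_rfl).mpr (by simp [dropF, ht, hs])
            simp only [List.filterMap_cons, contT hkD, if_true]
            rw [ih (k + 1) false D (fun i hi => by
              rw [hD i (by omega)]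
              simp only [dropF, ht, if_true, hs, List.mem_cons]
              constructor
              · rintro (rfl | h')
                · omega
                · exact h'
              · intro h'; right; exact h')]
            simp [specF, ht, hs]
          · have hkD : k ∈ D := (hD k le_rfl).mpr (by simp [dropF, ht, hs])
            simp only [List.filterMap_cons, contT hkD, if_true]
            rw [ih (k + 1) true D (fun i hi => by
              rw [hD i (by omega)]
              simp only [dropF, ht, if_true, hs, Bool.false_eq_true, if_false, List.mem_cons]
              constructor
              · rintro (rfl | h')
                · omega
                · exact h'
              · intro h'; right; exact h')]
            simp [specF, ht, hs]
      · have hkD : k ∉ D := by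
          intro hmem
          have h' := (hD k le_rfl).mp hmem
          simp only [dropF, ht, if_false] at h'
          have := dropF_lb flag rest (k + 1) false k h'
          omega
        simp only [List.filterMap_cons, contF hkD, Bool.false_eq_true, if_false]
        rw [ih (k + 1) false D (fun i hi => by
          rw [hD i (by omega)]
          simp [dropF, ht])]
        simp [specF, ht]

theorem B_eq_specF (command : List String) (flag : String) :
    strip_flag_with_value_alt command flag = specF flag command false := by
  unfold strip_flag_with_value_alt
  have hfold := lemBfold command flag command 0 (by simp) [] (by simp)
  have hc0 : PySem.Set.contains ([] : List Int) ((0 : Nat) : Int) = false := rfl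
  rw [hc0] at hfold
  simp only [Nat.cast_zero] at hfold
  rw [show (PySem.Set.empty : PySem.Set Int) = ([] : List Int) from rfl, hfold]
  simp only [List.nil_append]
  apply lemFilt flag command 0 false
  intro i _
  rw [dropF_eq_newF]
  simp

-- ===== VERDICT (by name: the statement is the Claim_ definition above) =====
theorem strip_flag_with_value_spec : Claim_equal_strip_flag_with_value := by
  intro command flag _
  unfold Spec_strip_flag_with_value
  rw [A_eq_specF, B_eq_specF]
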